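-- pv_equiv track=rewrite | github.com/dongmeic/EPA-WD | wdtools/utils/lot_numbers.py | _get_from_int
-- ===== SOURCE A (Python) =====
-- def _get_from_int(parcel_id):
--     s = str(parcel_id)
--     if len(str(parcel_id)) > 5:
--         idx = [i for i, char in enumerate(s) if char != '0']
--         lot_list = []
--         for i in range(len(idx) - 1):
--             lot_list.append(s[idx[i]:idx[i + 1]])
--         lot_list.append(s[idx[len(idx) - 1]:])
--         res = lot_list
--     else:
--         res = [s]
--     return res
-- ===== SOURCE B (Python) =====
-- def _get_from_int(parcel_id):
--     s = str(parcel_id)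
--     if len(s) > 5:
--         return _chunks(s)
--     return [s]
--
--
-- def _chunks(s):
--     # one pass: each chunk is a non-'0' character followed by its run of zeros
--     i = 0
--     while i < len(s) and s[i] == '0':
--         i += 1
--     if i == len(s):
--         return []
--     j = i + 1
--     while j < len(s) and s[j] == '0':
--         j += 1
--     return [s[i:j]] + _chunks(s[j:])
-- ===== Notes on version B (the rewrite author's own statement) =====
-- stated objective: simpler
-- what changed: Replaces A's two-phase 'collect all non-zero indices, then slice between consecutive indices' with a single recursive grouping pass that emits each non-'0' character together with its following run of zeros.
import Mathlib
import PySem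

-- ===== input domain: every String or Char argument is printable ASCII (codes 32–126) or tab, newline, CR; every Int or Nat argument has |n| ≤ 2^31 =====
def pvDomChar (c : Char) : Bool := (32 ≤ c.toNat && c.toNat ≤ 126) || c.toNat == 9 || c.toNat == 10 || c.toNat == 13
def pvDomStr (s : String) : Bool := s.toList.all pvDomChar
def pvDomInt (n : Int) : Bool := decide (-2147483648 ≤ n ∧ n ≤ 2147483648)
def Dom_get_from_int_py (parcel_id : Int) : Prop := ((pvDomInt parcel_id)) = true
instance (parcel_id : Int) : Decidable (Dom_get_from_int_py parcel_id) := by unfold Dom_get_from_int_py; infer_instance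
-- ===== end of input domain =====

-- B replaces A's 'collect non-zero indices, then slice between consecutive indices' by one
-- recursive grouping pass (each non-'0' char with its following zeros); objective: simpler.

-- ===== PORT A =====
-- s = str(parcel_id); strings handled on the List Char side (PySem.Int.toChars = (toStr).toList)
def get_from_int_py (parcel_id : Int) : List String :=
  let s : List Char := PySem.Int.toChars parcel_id
  if s.length > 5 then
    -- idx = [i for i, char in enumerate(s) if char != '0']
    let idx : List Int :=
      (PySem.List.enumerate s 0).filterMap (fun p => if p.2 ≠ '0' then some p.1 else none)
    -- for i in range(len(idx) - 1): lot_list.append(s[idx[i]:idx[i + 1]])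
    -- (idx[i]/idx[i+1] are always in range inside the loop, so pyGetD's default is never used)
    let lot_list : List String :=
      (PySem.List.pyRange 0 ((idx.length : Int) - 1) 1).foldl
        (fun acc i => acc ++ [String.ofList (PySem.List.slice s
            (some (PySem.List.pyGetD idx i 0)) (some (PySem.List.pyGetD idx (i + 1) 0)))]) []
    -- lot_list.append(s[idx[len(idx) - 1]:])
    match PySem.List.pyGet? idx ((idx.length : Int) - 1) with
    | some j => lot_list ++ [String.ofList (PySem.List.slice s (some j) none)]
    | none => []  -- Python raises IndexError here (idx empty); unreachable: str(int) of length > 5 has a non-'0' char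
  else [PySem.Int.toStr parcel_id]

-- ===== PORT B =====
-- _chunks(s): skip leading '0's (first while loop = dropWhile), then one chunk is the non-'0'
-- char plus its run of '0's (second while loop = takeWhile), recurse on the rest (s[j:]).
def chunks_py (s : List Char) : List String :=
  match h : s.dropWhile (· == '0') with
  | [] => []
  | c :: rest =>
      String.ofList (c :: rest.takeWhile (· == '0')) ::
        chunks_py (rest.drop (rest.takeWhile (· == '0')).length)
termination_by s.length
decreasing_by
  have h1 : (s.dropWhile (· == '0')).length ≤ s.length := (List.dropWhile_sublist _).length_le
  rw [h] at h1
  simp only [List.length_cons, List.length_drop] at *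
  omega

def get_from_int_py_alt (parcel_id : Int) : List String :=
  let s : List Char := PySem.Int.toChars parcel_id
  if s.length > 5 then chunks_py s
  else [PySem.Int.toStr parcel_id]

-- ===== PRECONDITION & SPEC =====
def Spec_get_from_int_py (parcel_id : Int) (out : List String) : Prop := out = get_from_int_py_alt parcel_id
instance (parcel_id : Int) (out : List String) : Decidable (Spec_get_from_int_py parcel_id out) := by unfold Spec_get_from_int_py; infer_instance

-- ===== CLAIM (what is proved, stated in full; the proofs are below) =====
def Claim_equal_get_from_int_py : Prop := ∀ (parcel_id : Int), Dom_get_from_int_py parcel_id → Spec_get_from_int_py parcel_id (get_from_int_py parcel_id)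

-- ===== LEMMAS AND PROOFS =====

-- positions (from offset k) of the non-'0' characters: the Nat-level view of A's idx list
def nzAux : List Char → Nat → List Nat
  | [], _ => []
  | c :: t, k => if c ≠ '0' then k :: nzAux t (k + 1) else nzAux t (k + 1)

-- A's slice pattern: pieces between consecutive indices, then the tail from the last index
def sliceChunks (cs : List Char) : List Nat → List (List Char)
  | [] => []
  | [k] => [cs.drop k]
  | k1 :: k2 :: ks => (cs.drop k1).take (k2 - k1) :: sliceChunks cs (k2 :: ks)

set_option maxRecDepth 16384 in
lemma idx_eq_nzAux (s : List Char) : ∀ k : Nat,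
    (PySem.List.enumerate s (k : Int)).filterMap
        (fun p => if p.2 ≠ '0' then some p.1 else none)
      = (nzAux s k).map (fun n => ((n : Nat) : Int)) := by
  induction s with
  | nil => intro k; simp [PySem.List.enumerate_nil, nzAux]
  | cons c t ih =>
    intro k
    rw [PySem.List.enumerate_cons, List.filterMap_cons]
    have hk : ((k : Int) + 1) = ((k + 1 : Nat) : Int) := by push_cast; ring
    rw [hk, ih (k + 1)]
    by_cases hc : c = '0'
    · simp only [nzAux, hc]
      simp
    · simp only [nzAux]
      simp [hc]

lemma nzAux_add (s : List Char) : ∀ k j : Nat,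
    nzAux s (j + k) = (nzAux s j).map (· + k) := by
  induction s with
  | nil => intro k j; simp [nzAux]
  | cons c t ih =>
    intro k j
    by_cases hc : c = '0' <;>
      simp [nzAux, hc, Nat.add_right_comm j k 1, ih k (j + 1)]

lemma nzAux_append_zeros (zeros : List Char) (ds : List Char)
    (hz : ∀ x ∈ zeros, x = '0') : ∀ k : Nat,
    nzAux (zeros ++ ds) k = nzAux ds (k + zeros.length) := by
  induction zeros with
  | nil => intro k; simp
  | cons c t ih =>
    intro k
    have hc : c = '0' := hz c (by simp)
    have ht : ∀ x ∈ t, x = '0' := fun x hx => hz x (by simp [hx])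
    simp only [List.cons_append, nzAux, hc, ne_eq, not_true_eq_false, if_false,
      ih ht (k + 1), List.length_cons]
    ring_nf

lemma nzAux_nil_iff (s : List Char) : ∀ k, nzAux s k = [] ↔ ∀ x ∈ s, x = '0' := by
  induction s with
  | nil => intro k; simp [nzAux]
  | cons c t ih =>
    intro k
    by_cases hc : c = '0' <;> simp [nzAux, hc, ih (k + 1)]

-- A's index/range/slice loop body equals the recursive slice pattern
lemma range_slices_eq_sliceChunks (cs : List Char) :
    ∀ ks : List Nat, ks ≠ [] →
    ((List.range (ks.length - 1)).map (fun i =>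
        String.ofList ((cs.drop (ks.getD i 0)).take (ks.getD (i + 1) 0 - ks.getD i 0))))
      ++ [String.ofList (cs.drop (ks.getD (ks.length - 1) 0))]
    = (sliceChunks cs ks).map String.ofList := by
  intro ks
  induction ks with
  | nil => intro h; exact absurd rfl h
  | cons k1 tl ih =>
    intro _
    cases tl with
    | nil => simp [sliceChunks]
    | cons k2 ks2 =>
      have step := ih (by simp)
      simp only [List.length_cons, Nat.add_sub_cancel] at step ⊢
      rw [List.range_succ_eq_map]
      simp only [List.map_cons, List.map_map, List.cons_append, sliceChunks]
      congr 1

lemma sliceChunks_shift (pre ds : List Char) :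
    ∀ ks : List Nat, sliceChunks (pre ++ ds) (ks.map (· + pre.length)) = sliceChunks ds ks := by
  intro ks
  induction ks with
  | nil => simp [sliceChunks]
  | cons k1 tl ih =>
    cases tl with
    | nil =>
      simp only [List.map_cons, List.map_nil, sliceChunks]
      rw [Nat.add_comm k1 pre.length, List.drop_length_add_append]
    | cons k2 ks2 =>
      simp only [List.map_cons, sliceChunks] at ih ⊢
      rw [Nat.add_comm k1 pre.length, List.drop_length_add_append, ih,
        show k2 + pre.length - (pre.length + k1) = k2 - k1 from by omega]

lemma dropWhile_head_false {p : Char → Bool} {l : List Char} {c : Char} {r : List Char}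
    (h : l.dropWhile p = c :: r) : p c = false := by
  have := List.head?_dropWhile_not p l
  rw [h] at this
  simpa using this

lemma take_takeWhile_len (p : Char → Bool) (l : List Char) :
    l.take (l.takeWhile p).length = l.takeWhile p :=
  (List.prefix_iff_eq_take.mp (List.takeWhile_prefix p)).symm

lemma dropWhile_eq_drop (p : Char → Bool) (l : List Char) :
    l.dropWhile p = l.drop (l.takeWhile p).length := by
  induction l with
  | nil => rfl
  | cons c t ih => by_cases hc : p c <;> simp [hc, ih]


lemma chunks_py_of_nil {cs : List Char} (h : cs.dropWhile (· == '0') = []) :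
    chunks_py cs = [] := by
  rw [chunks_py]
  split
  · rfl
  · simp_all

lemma chunks_py_of_cons {cs : List Char} {c : Char} {rest : List Char}
    (h : cs.dropWhile (· == '0') = c :: rest) :
    chunks_py cs = String.ofList (c :: rest.takeWhile (· == '0')) ::
      chunks_py (rest.drop (rest.takeWhile (· == '0')).length) := by
  rw [chunks_py]
  split
  · simp_all
  · rename_i c' rest' heq
    rw [h] at heq
    injection heq with h1 h2
    subst h1; subst h2
    rfl

-- the main induction: A's slice pattern on the non-zero positions IS B's grouping pass
lemma sliceChunks_nzAux_eq_chunks : ∀ n (cs : List Char), cs.length ≤ n →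
    (sliceChunks cs (nzAux cs 0)).map String.ofList = chunks_py cs := by
  intro n
  induction n with
  | zero =>
    intro cs hcs
    have : cs = [] := List.eq_nil_of_length_eq_zero (Nat.le_zero.mp hcs)
    subst this
    rw [chunks_py]
    simp [nzAux, sliceChunks]
  | succ m ih =>
    intro cs hcs
    rcases h : cs.dropWhile (· == '0') with _ | ⟨c, rest⟩
    · -- all characters are '0': both sides are []
      have hall : ∀ x ∈ cs, x = '0' := by
        intro x hx
        have := (List.dropWhile_eq_nil_iff).mp h x hx
        simpa using this
      rw [chunks_py_of_nil h, (nzAux_nil_iff cs 0).mpr hall]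
      simp [sliceChunks]
    · -- cs = zeros ++ c :: rest, with zeros all '0' and c ≠ '0'
      have hc : c ≠ '0' := by
        have := dropWhile_head_false h
        simpa using this
      set zeros := cs.takeWhile (· == '0') with hzdef
      have hsplit : zeros ++ c :: rest = cs := by
        conv_rhs => rw [← List.takeWhile_append_dropWhile (p := (· == '0')) (l := cs)]
        rw [h]
      have hzall : ∀ x ∈ zeros, x = '0' := by
        intro x hx
        have := List.mem_takeWhile_imp hx
        simpa using this
      set zs := rest.takeWhile (· == '0') with hzsdef
      set rest' := rest.drop zs.length with hrdef
      have hrest : zs ++ rest' = rest := by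
        have := List.take_append_drop zs.length rest
        rw [hzsdef] at this ⊢
        rwa [take_takeWhile_len] at this
      have hzsall : ∀ x ∈ zs, x = '0' := by
        intro x hx
        have := List.mem_takeWhile_imp hx
        simpa using this
      have hrest' : rest' = rest.dropWhile (· == '0') := by
        rw [hrdef, hzsdef, dropWhile_eq_drop]
      -- length bound for the induction hypothesis
      have hlen : rest'.length ≤ m := by
        have h1 : cs.length = zeros.length + 1 + rest.length := by
          rw [← hsplit]; simp; omega
        have h2 : rest'.length ≤ rest.length := by rw [hrdef]; simp
        omega
      -- compute nzAux cs 0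
      have hnz : nzAux cs 0
          = zeros.length :: (nzAux rest' 0).map (· + (zeros.length + 1 + zs.length)) := by
        calc nzAux cs 0 = nzAux (zeros ++ c :: rest) 0 := by rw [hsplit]
          _ = nzAux (c :: rest) zeros.length := by
                rw [nzAux_append_zeros zeros _ hzall 0]; ring_nf
          _ = zeros.length :: nzAux rest (zeros.length + 1) := by simp [nzAux, hc]
          _ = zeros.length :: nzAux rest' (zeros.length + 1 + zs.length) := by
                rw [← hrest, nzAux_append_zeros zs _ hzsall]
          _ = zeros.length :: (nzAux rest' 0).map (· + (zeros.length + 1 + zs.length)) := by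
                have h5 := nzAux_add rest' (zeros.length + 1 + zs.length) 0
                rw [Nat.zero_add] at h5
                rw [h5]
      -- unfold B one step
      have hB : chunks_py cs = String.ofList (c :: zs) :: chunks_py rest' := by
        rw [chunks_py_of_cons h]
      rcases h2 : nzAux rest' 0 with _ | ⟨k0, tl0⟩
      · -- rest' is all '0'; being a dropWhile result it must be empty
        have hre : rest' = [] := by
          rcases h3 : rest' with _ | ⟨c', t'⟩
          · rfl
          · have hall' := (nzAux_nil_iff rest' 0).mp h2
            have : c' = '0' := hall' c' (by rw [h3]; simp)
            have hne : c' ≠ '0' := by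
              have := dropWhile_head_false (hrest'.symm.trans h3)
              simpa using this
            exact absurd this hne
        rw [hnz, h2, hB, hre]
        have hzrest : rest = zs := by rw [← hrest, hre]; simp
        rw [chunks_py_of_nil (by simp : ([] : List Char).dropWhile (· == '0') = [])]
        simp only [List.map_nil, sliceChunks, List.map_cons]
        rw [← hsplit, List.drop_left, hzrest]
      · -- rest' starts with a non-'0' char, so k0 = 0
        rcases h3 : rest' with _ | ⟨c', t'⟩
        · rw [h3] at h2; simp [nzAux] at h2
        · have hne : c' ≠ '0' := by
            have := dropWhile_head_false (hrest'.symm.trans h3)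
            simpa using this
          have h4 : nzAux rest' 0 = 0 :: nzAux t' 1 := by rw [h3]; simp [nzAux, hne]
          rw [h2] at h4
          have hk0 : k0 = 0 := (List.cons_eq_cons.mp h4).1
          rw [hnz, h2, hk0]
          simp only [List.map_cons, Nat.zero_add, sliceChunks, List.map_cons]
          rw [hB]
          congr 1
          · -- first chunk: (cs.drop zeros.length).take (zs.length + 1) = c :: zs
            rw [← hsplit, List.drop_left]
            rw [show zeros.length + 1 + zs.length - zeros.length = zs.length + 1 from by omega]
            simp only [List.take_succ_cons]
            rw [hzsdef, take_takeWhile_len]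
          · -- remaining chunks: shift into rest' and use the induction hypothesis
            have hpre : cs = (zeros ++ c :: zs) ++ rest' := by
              rw [← hsplit, ← hrest]; simp
            have hplen : (zeros ++ c :: zs).length = zeros.length + 1 + zs.length := by
              simp; omega
            have hshift := sliceChunks_shift (zeros ++ c :: zs) rest' (0 :: tl0)
            rw [hplen] at hshift
            rw [hpre]
            have : ((0 : Nat) :: tl0).map (· + (zeros.length + 1 + zs.length))
                = (zeros.length + 1 + zs.length) :: tl0.map (· + (zeros.length + 1 + zs.length)) := by
              simp
            rw [← this, hshift, ← hk0, ← h2, ih rest' hlen]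


lemma branch_eq (cs : List Char) (ks : List Nat) (hne : ks ≠ []) :
    (match PySem.List.pyGet? (ks.map (fun n => ((n : Nat) : Int)))
        (((ks.map (fun n => ((n : Nat) : Int))).length : Int) - 1) with
     | some j =>
        (PySem.List.pyRange 0 (((ks.map (fun n => ((n : Nat) : Int))).length : Int) - 1) 1).foldl
          (fun acc i => acc ++ [String.ofList (PySem.List.slice cs
              (some (PySem.List.pyGetD (ks.map (fun n => ((n : Nat) : Int))) i 0))
              (some (PySem.List.pyGetD (ks.map (fun n => ((n : Nat) : Int))) (i + 1) 0)))]) []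
        ++ [String.ofList (PySem.List.slice cs (some j) none)]
     | none => []) = (sliceChunks cs ks).map String.ofList := by
  have hpos : 1 ≤ ks.length := List.length_pos_iff.mpr hne
  have hlen : (ks.map (fun n => ((n : Nat) : Int))).length = ks.length := by simp
  have hcast : ((ks.length : Int) - 1) = ((ks.length - 1 : Nat) : Int) := by omega
  rw [hlen, hcast, PySem.List.pyGet?_natCast]
  have hget : (ks.map (fun n => ((n : Nat) : Int)))[ks.length - 1]? = some ((ks.getD (ks.length - 1) 0 : Nat) : Int) := by
    rw [List.getElem?_map, List.getElem?_eq_getElem (by omega), List.getD_eq_getElem _ _ (by omega)]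
    rfl
  rw [hget]
  rw [PySem.List.pyRange_zero_natCast, List.foldl_map, PySem.List.foldl_append_singleton_eq_map]
  rw [← range_slices_eq_sliceChunks cs ks hne]
  simp only [List.nil_append, PySem.List.slice_from_natCast]
  congr 1
  apply List.map_congr_left
  intro i hi
  have hi1 : ((i : Int) + 1) = ((i + 1 : Nat) : Int) := by push_cast; ring
  rw [hi1, PySem.List.pyGetD_natCast, PySem.List.pyGetD_natCast,
    show (0 : Int) = ((0 : Nat) : Int) from rfl, List.getD_map, List.getD_map,
    PySem.List.slice_natCast]

-- ===== VERDICT (by name: the statement is the Claim_ definition above) =====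
theorem get_from_int_py_spec : Claim_equal_get_from_int_py := by
  intro p hd
  unfold Spec_get_from_int_py get_from_int_py get_from_int_py_alt
  by_cases h5 : (PySem.Int.toChars p).length > 5
  · simp only [h5, if_pos]
    rw [show (PySem.List.enumerate (PySem.Int.toChars p) 0).filterMap
          (fun p => if p.2 ≠ '0' then some p.1 else none)
        = (nzAux (PySem.Int.toChars p) 0).map (fun n => ((n : Nat) : Int)) from by
      simpa using idx_eq_nzAux (PySem.Int.toChars p) 0]
    rcases hks : nzAux (PySem.Int.toChars p) 0 with _ | ⟨k, tl⟩
    · -- idx is empty (every char is '0'); A's port returns [] where Python would raise,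
      -- and chunks_py also returns [] (unreachable: str(int) of length > 5)
      have hall := (nzAux_nil_iff (PySem.Int.toChars p) 0).mp hks
      have hdw : (PySem.Int.toChars p).dropWhile (· == '0') = [] :=
        List.dropWhile_eq_nil_iff.mpr (fun x hx => by simp [hall x hx])
      rw [chunks_py_of_nil hdw]
      simp [PySem.List.pyGet?]
    · rw [branch_eq (PySem.Int.toChars p) (k :: tl) (by simp), ← hks,
        sliceChunks_nzAux_eq_chunks (PySem.Int.toChars p).length (PySem.Int.toChars p) le_rfl]
  · simp [h5]
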